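-- pv_equiv track=rewrite | github.com/mihir-s-05/persona-debate | src/debate_v_majority/shared/answers.py | plurality_answer
-- ===== SOURCE A (Python) =====
-- from collections import Counter
--
-- def plurality_answer(answers: list[str | None] | None) -> str | None:
--     """Return the unique non-None plurality answer, else None."""
--     if not answers:
--         return None
--     filtered = [str(answer) for answer in answers if answer is not None]
--     if not filtered:
--         return None
--     counts = Counter(filtered)
--     top_count = max(counts.values(), default=0)
--     winners = [answer for answer, count in counts.items() if count == top_count]
--     return winners[0] if len(winners) == 1 else None
-- ===== SOURCE B (Python) =====
-- def plurality_answer(answers):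
--     """Return the unique non-None plurality answer, else None."""
--     if not answers:
--         return None
--     filtered = [str(answer) for answer in answers if answer is not None]
--     if not filtered:
--         return None
--     best_len = 0
--     best_str = None
--     tied = False
--     prev = None
--     run = 0
--     for s in sorted(filtered):
--         if s == prev:
--             run += 1
--         else:
--             prev = s
--             run = 1
--         if run > best_len:
--             best_len, best_str, tied = run, s, False
--         elif run == best_len and s != best_str:
--             tied = True
--     return None if tied else best_str
-- ===== Notes on version B (the rewrite author's own statement) =====
-- stated objective: alternative
-- what changed: Replaces the Counter/most-count tally with a sort-then-scan: sort the filtered answers and walk them once, tracking the current run length, the longest run, its string, and a tie flag, instead of building a hash counter and filtering its items for winners.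
import Mathlib
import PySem

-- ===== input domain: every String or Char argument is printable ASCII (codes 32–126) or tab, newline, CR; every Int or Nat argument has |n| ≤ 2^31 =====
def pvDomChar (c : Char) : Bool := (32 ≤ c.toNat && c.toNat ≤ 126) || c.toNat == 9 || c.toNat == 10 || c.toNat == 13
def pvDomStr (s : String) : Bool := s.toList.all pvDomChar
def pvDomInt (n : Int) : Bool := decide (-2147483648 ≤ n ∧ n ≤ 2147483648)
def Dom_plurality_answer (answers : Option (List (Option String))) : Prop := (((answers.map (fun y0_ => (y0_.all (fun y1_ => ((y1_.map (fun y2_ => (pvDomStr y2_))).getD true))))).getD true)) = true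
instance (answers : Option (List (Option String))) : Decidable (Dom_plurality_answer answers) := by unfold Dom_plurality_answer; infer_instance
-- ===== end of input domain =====

-- B replaces A's Counter tally with a sort-then-scan over runs of equal answers; proved to return the same value on every input.


-- ===== PORT A =====
def plurality_answer (answers : Option (List (Option String))) : Option String :=
  match answers with
  | none => none
  | some xs =>
    if xs = [] then none
    else
      -- [str(answer) for answer in answers if answer is not None]; str() is the identity on str
      let filtered : List String := xs.filterMap (fun a => a.map (fun s => s))
      if filtered = [] then none
      else
        let counts := PySem.Dict.counter filtered
        let top_count : Int := (PySem.List.max? counts.values (fun v => v)).getD 0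
        let winners := (counts.items.filter (fun p => p.2 == top_count)).map (fun p => p.1)
        if winners.length = 1 then winners.head? else none

-- ===== PORT B =====
-- the body of Source B's `for s in sorted(filtered)` loop; state = (best_len, best_str, tied, prev, run)
def pvStep (st : Int × Option String × Bool × Option String × Int) (s : String) :
    Int × Option String × Bool × Option String × Int :=
  let best_len := st.1
  let best_str := st.2.1
  let tied := st.2.2.1
  let prev0 := st.2.2.2.1
  let run0 := st.2.2.2.2
  let pr : Option String × Int := if prev0 = some s then (prev0, run0 + 1) else (some s, 1)
  let prev := pr.1
  let run := pr.2
  if best_len < run then (run, some s, false, prev, run)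
  else if run = best_len ∧ best_str ≠ some s then (best_len, best_str, true, prev, run)
  else (best_len, best_str, tied, prev, run)

def plurality_answer_alt (answers : Option (List (Option String))) : Option String :=
  match answers with
  | none => none
  | some xs =>
    if xs = [] then none
    else
      let filtered : List String := xs.filterMap (fun a => a.map (fun s => s))
      if filtered = [] then none
      else
        let fin := (PySem.List.sorted filtered (fun s => s)).foldl pvStep (0, none, false, none, 0)
        if fin.2.2.1 then none else fin.2.1

-- ===== PRECONDITION & SPEC =====
def Spec_plurality_answer (answers : Option (List (Option String))) (out : Option String) : Prop := out = plurality_answer_alt answers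
instance (answers : Option (List (Option String))) (out : Option String) : Decidable (Spec_plurality_answer answers out) := by unfold Spec_plurality_answer; infer_instance

-- ===== CLAIM (what is proved, stated in full; the proofs are below) =====
def Claim_equal_plurality_answer : Prop := ∀ (answers : Option (List (Option String))), Dom_plurality_answer answers → Spec_plurality_answer answers (plurality_answer answers)

-- ===== LEMMAS AND PROOFS =====

-- the effect of one whole run of `k` equal strings on (best_len, best_str, tied)
def pvUpd (s : Int × Option String × Bool) (x : String) (k : Int) : Int × Option String × Bool :=
  if s.1 < k then (k, some x, false)
  else if s.1 = k ∧ s.2.1 ≠ some x then (s.1, s.2.1, true)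
  else s

theorem pvTup (a a' : Int) (b : Option String) (c : Bool) (d : Option String) (e e' : Int)
    (h1 : a = a') (h2 : e = e') :
    (a, b, c, d, e) = (a', b, c, d, e') := by subst h1; subst h2; rfl

-- continuing an ongoing run of x (prev = some x, current run length j) through m more copies of x
theorem pvRun (x : String) (m : Nat) : ∀ (j b : Int) (bs : Option String) (t : Bool), j ≤ b →
    (List.replicate m x).foldl pvStep (b, bs, t, some x, j) =
      (if b < j + m then ((j + m : Int), some x, false, some x, (j + m : Int))
       else if b = j + m ∧ 1 ≤ (m : Int) ∧ bs ≠ some x then (b, bs, true, some x, (j + m : Int))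
       else (b, bs, t, some x, (j + m : Int))) := by
  induction m with
  | zero =>
    intro j b bs t hj
    simp only [List.replicate, List.foldl_nil, Nat.cast_zero, add_zero]
    rw [if_neg (by omega), if_neg (by rintro ⟨-, h2, -⟩; omega)]
  | succ m ih =>
    intro j b bs t hj
    rw [List.replicate_succ, List.foldl_cons]
    have hstep : pvStep (b, bs, t, some x, j) x =
        (if b < j + 1 then ((j + 1 : Int), some x, false, some x, (j + 1 : Int))
         else if j + 1 = b ∧ bs ≠ some x then (b, bs, true, some x, (j + 1 : Int))
         else (b, bs, t, some x, (j + 1 : Int))) := by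
      simp [pvStep]
    rw [hstep]
    push_cast
    by_cases h1 : b < j + 1
    · rw [if_pos h1, ih (j+1) (j+1) (some x) false (le_refl _),
        if_pos (show b < j + ((m:Int) + 1) by omega)]
      by_cases hm : (0:Int) < m
      · rw [if_pos (by omega)]
        exact pvTup _ _ _ _ _ _ _ (by omega) (by omega)
      · rw [if_neg (by omega), if_neg (by rintro ⟨-, h2, -⟩; omega)]
        exact pvTup _ _ _ _ _ _ _ (by omega) (by omega)
    · rw [if_neg h1]
      by_cases h2 : j + 1 = b ∧ bs ≠ some x
      · rw [if_pos h2, ih (j+1) b bs true (by omega)]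
        by_cases hm : b < j + 1 + m
        · rw [if_pos hm, if_pos (by omega)]
          exact pvTup _ _ _ _ _ _ _ (by omega) (by omega)
        · have hm0 : (m:Int) = 0 := by omega
          rw [if_neg hm, if_neg (by rintro ⟨ha, hb', -⟩; omega),
            if_neg (by omega), if_pos ⟨by omega, by omega, h2.2⟩]
          exact pvTup _ _ _ _ _ _ _ (by omega) (by omega)
      · rw [if_neg h2, ih (j+1) b bs t (by omega)]
        by_cases hm : b < j + 1 + m
        · rw [if_pos hm, if_pos (by omega)]
          exact pvTup _ _ _ _ _ _ _ (by omega) (by omega)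
        · rw [if_neg hm]
          by_cases h3 : b = j + 1 + (m:Int) ∧ 1 ≤ (m:Int) ∧ bs ≠ some x
          · rw [if_pos h3, if_neg (by omega), if_pos ⟨by omega, by omega, h3.2.2⟩]
            exact pvTup _ _ _ _ _ _ _ (by omega) (by omega)
          · rw [if_neg h3]
            rw [if_neg (show ¬ b < j + ((m:Int) + 1) by omega)]
            rw [if_neg (show ¬ (b = j + ((m:Int) + 1) ∧ 1 ≤ (m:Int) + 1 ∧ bs ≠ some x) by
              rintro ⟨ha, -, hc⟩
              by_cases hm0 : 1 ≤ (m:Int)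
              · exact h3 ⟨by omega, hm0, hc⟩
              · exact h2 ⟨by omega, hc⟩)]
            exact pvTup _ _ _ _ _ _ _ rfl (by omega)

-- one whole fresh group: k ≥ 1 copies of x entered with prev ≠ some x
theorem pvGroup (x : String) (k : Nat) (hk : 1 ≤ k) (b : Int) (bs : Option String) (t : Bool)
    (pr : Option String) (r : Int) (hpr : pr ≠ some x) :
    (List.replicate k x).foldl pvStep (b, bs, t, pr, r) =
      ((pvUpd (b, bs, t) x k).1, (pvUpd (b, bs, t) x k).2.1, (pvUpd (b, bs, t) x k).2.2,
        some x, (k : Int)) := by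
  obtain ⟨k', rfl⟩ : ∃ k', k = k' + 1 := ⟨k - 1, by omega⟩
  rw [List.replicate_succ, List.foldl_cons]
  have hstep : pvStep (b, bs, t, pr, r) x =
      (if b < 1 then ((1 : Int), some x, false, some x, (1 : Int))
       else if 1 = b ∧ bs ≠ some x then (b, bs, true, some x, (1 : Int))
       else (b, bs, t, some x, (1 : Int))) := by
    simp [pvStep, if_neg hpr]
  rw [hstep]
  unfold pvUpd
  by_cases h1 : b < 1
  · rw [if_pos h1, pvRun x k' 1 1 (some x) false (le_refl _),
      if_pos (show b < ((k' + 1 : Nat) : Int) by push_cast; omega)]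
    by_cases hm : (0:Int) < k'
    · rw [if_pos (by omega)]
      exact pvTup _ _ _ _ _ _ _ (by push_cast; omega) (by push_cast; omega)
    · rw [if_neg (by omega), if_neg (by rintro ⟨-, h, -⟩; omega)]
      exact pvTup _ _ _ _ _ _ _ (by push_cast; omega) (by push_cast; omega)
  · rw [if_neg h1]
    by_cases h2 : 1 = b ∧ bs ≠ some x
    · rw [if_pos h2, pvRun x k' 1 b bs true (by omega)]
      by_cases hm : b < 1 + k'
      · rw [if_pos hm, if_pos (by push_cast; omega)]
        exact pvTup _ _ _ _ _ _ _ (by push_cast; omega) (by push_cast; omega)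
      · rw [if_neg hm, if_neg (by rintro ⟨ha, hb', -⟩; omega),
          if_neg (by push_cast; omega), if_pos ⟨by push_cast; omega, h2.2⟩]
        exact pvTup _ _ _ _ _ _ _ rfl (by push_cast; omega)
    · rw [if_neg h2, pvRun x k' 1 b bs t (by omega)]
      by_cases hm : b < 1 + k'
      · rw [if_pos hm, if_pos (by push_cast; omega)]
        exact pvTup _ _ _ _ _ _ _ (by push_cast; omega) (by push_cast; omega)
      · rw [if_neg hm]
        by_cases h3 : b = 1 + (k':Int) ∧ 1 ≤ (k':Int) ∧ bs ≠ some x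
        · rw [if_pos h3, if_neg (by push_cast; omega),
            if_pos ⟨by push_cast; omega, h3.2.2⟩]
          exact pvTup _ _ _ _ _ _ _ rfl (by push_cast; omega)
        · rw [if_neg h3]
          rw [if_neg (show ¬ b < ((k' + 1 : Nat) : Int) by push_cast; omega)]
          rw [if_neg (show ¬ (b = ((k' + 1 : Nat) : Int) ∧ bs ≠ some x) by
            rintro ⟨ha, hc⟩
            by_cases hm0 : 1 ≤ (k':Int)
            · exact h3 ⟨by push_cast at ha ⊢; omega, hm0, hc⟩
            · exact h2 ⟨by push_cast at ha; omega, hc⟩)]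
          exact pvTup _ _ _ _ _ _ _ rfl (by push_cast; omega)

-- sorted decomposition: a ≤-sorted list whose elements are all ≥ x is x's run followed by strictly larger elements
theorem pvDecomp (x : String) : ∀ (t : List String), t.Pairwise (· ≤ ·) → (∀ y ∈ t, x ≤ y) →
    t = List.replicate (t.count x) x ++ t.filter (fun y => y ≠ x) ∧
    (∀ y ∈ t.filter (fun y => y ≠ x), x < y) := by
  intro t
  induction t with
  | nil => intro _ _; simp
  | cons z t' ih =>
    intro hpw hge
    have hz : x ≤ z := hge z (List.mem_cons_self)
    have hpw' : t'.Pairwise (· ≤ ·) := (List.pairwise_cons.mp hpw).2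
    have hzle : ∀ y ∈ t', z ≤ y := (List.pairwise_cons.mp hpw).1
    have hstrict : ∀ y ∈ (z :: t').filter (fun y => y ≠ x), x < y := by
      intro y hy
      have hy' := List.of_mem_filter hy
      have hymem := List.mem_of_mem_filter hy
      exact lt_of_le_of_ne (hge y hymem) (Ne.symm (by simpa using hy'))
    by_cases hzx : z = x
    · obtain ⟨ih1, -⟩ := ih hpw' (fun y hy => hge y (List.mem_cons_of_mem _ hy))
      refine ⟨?_, hstrict⟩
      subst hzx
      rw [List.count_cons_self, List.replicate_succ, List.filter_cons_of_neg (by simp),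
        List.cons_append]
      exact congrArg (List.cons z) ih1
    · have hnx : x ∉ t' := fun hmem => hzx (le_antisymm (hzle x hmem) hz)
      refine ⟨?_, hstrict⟩
      have hc0 : List.count x (z :: t') = 0 :=
        List.count_eq_zero.mpr (by
          simp only [List.mem_cons, not_or]
          exact ⟨fun h => hzx h.symm, hnx⟩)
      have hfe : t'.filter (fun y => y ≠ x) = t' :=
        List.filter_eq_self.mpr (fun a ha => by
          simp only [ne_eq, decide_eq_true_eq]
          exact fun h => hnx (h ▸ ha))
      rw [hc0, List.replicate_zero, List.nil_append,
        List.filter_cons_of_pos (by simpa using hzx), hfe]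

-- accumulating PySem.Set.ofList keeps a fresh head element in front
theorem pvOfListCons (x : String) : ∀ (r : List String), x ∉ r →
    ∀ s : List String, List.foldl PySem.Set.add (x :: s) r = x :: List.foldl PySem.Set.add s r := by
  intro r
  induction r with
  | nil => intro _ s; rfl
  | cons y r' ih =>
    intro hx s
    have hyx : (y == x) = false := by
      simp only [beq_eq_false_iff_ne, ne_eq]
      exact fun h => hx (by rw [← h]; exact List.mem_cons_self)
    have hx' : x ∉ r' := fun h => hx (List.mem_cons_of_mem _ h)
    rw [List.foldl_cons, List.foldl_cons]
    have hadd : PySem.Set.add (x :: s) y =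
        if List.contains s y then x :: s else x :: (s ++ [y]) := by
      simp only [PySem.Set.add, PySem.Set.contains, List.contains_cons, hyx, Bool.false_or]
      split_ifs with h
      · rfl
      · rfl
    rw [hadd]
    by_cases hc : List.contains s y
    · rw [if_pos hc, ih hx' s]
      have : PySem.Set.add s y = s := by
        simp only [PySem.Set.add, PySem.Set.contains, hc, if_pos]
      rw [this]
    · rw [if_neg hc, ih hx' (s ++ [y])]
      have : PySem.Set.add s y = s ++ [y] := by
        simp only [PySem.Set.add, PySem.Set.contains]
        rw [if_neg hc]
      rw [this]

theorem pvReplicateOfList (x : String) : ∀ (k : Nat), 1 ≤ k →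
    List.foldl PySem.Set.add PySem.Set.empty (List.replicate k x) = [x] := by
  intro k
  induction k with
  | zero => omega
  | succ k ih =>
    intro _
    rw [List.replicate_succ, List.foldl_cons]
    have h1 : PySem.Set.add PySem.Set.empty x = [x] := rfl
    rw [h1]
    rcases Nat.eq_zero_or_pos k with hk0 | hk1
    · subst hk0; rfl
    · have : ∀ m, List.foldl PySem.Set.add [x] (List.replicate m x) = [x] := by
        intro m
        induction m with
        | zero => rfl
        | succ m ihm =>
          rw [List.replicate_succ, List.foldl_cons]
          have : PySem.Set.add [x] x = [x] := by
            simp [PySem.Set.add, PySem.Set.contains]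
          rw [this, ihm]
      exact this k

theorem pvOfListDecomp (x : String) (k : Nat) (hk : 1 ≤ k) (r : List String) (hx : x ∉ r) :
    PySem.Set.ofList (List.replicate k x ++ r) = x :: PySem.Set.ofList r := by
  unfold PySem.Set.ofList
  rw [List.foldl_append, pvReplicateOfList x k hk]
  exact pvOfListCons x r hx PySem.Set.empty

-- stage 1: on a sorted list, the 5-state loop projects to the pvUpd-fold over the distinct values
theorem pvStage1 : ∀ (n : Nat) (l : List String), l.length ≤ n → l.Pairwise (· ≤ ·) →
    ∀ (b : Int) (bs : Option String) (t : Bool) (pr : Option String) (r : Int),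
    (∀ x ∈ l, pr ≠ some x) → (∀ x ∈ l, bs ≠ some x) →
    ∃ pr' r',
      l.foldl pvStep (b, bs, t, pr, r) =
        (((PySem.Set.ofList l).foldl (fun s x => pvUpd s x (l.count x)) (b, bs, t)).1,
         ((PySem.Set.ofList l).foldl (fun s x => pvUpd s x (l.count x)) (b, bs, t)).2.1,
         ((PySem.Set.ofList l).foldl (fun s x => pvUpd s x (l.count x)) (b, bs, t)).2.2,
         pr', r') := by
  intro n
  induction n with
  | zero =>
    intro l hlen _ b bs t pr r _ _
    have hl : l = [] := List.length_eq_zero_iff.mp (Nat.le_zero.mp hlen)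
    subst hl
    exact ⟨pr, r, rfl⟩
  | succ n ih =>
    intro l hlen hpw b bs t pr r hpr hbs
    match l, hlen, hpw, hpr, hbs with
    | [], _, _, _, _ => exact ⟨pr, r, rfl⟩
    | x :: t0, hlen, hpw, hpr, hbs =>
      have hge : ∀ y ∈ x :: t0, x ≤ y := by
        intro y hy
        rcases List.mem_cons.mp hy with h | h
        · exact le_of_eq h.symm
        · exact (List.pairwise_cons.mp hpw).1 y h
      obtain ⟨h1, hstrict⟩ := pvDecomp x (x :: t0) hpw hge
      set rf := (x :: t0).filter (fun y => y ≠ x) with hrf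
      have hk : 1 ≤ (x :: t0).count x := List.count_pos_iff.mpr List.mem_cons_self
      have hxrf : x ∉ rf := fun h => by simpa using List.of_mem_filter h
      have hlenrf : rf.length ≤ n := by
        have := congrArg List.length h1
        rw [List.length_append, List.length_replicate] at this
        simp only [List.length_cons] at this hlen
        omega
      have hprx : pr ≠ some x := hpr x List.mem_cons_self
      have hsplit : (x :: t0).foldl pvStep (b, bs, t, pr, r) =
          rf.foldl pvStep ((pvUpd (b, bs, t) x ((x :: t0).count x)).1,
            (pvUpd (b, bs, t) x ((x :: t0).count x)).2.1,
            (pvUpd (b, bs, t) x ((x :: t0).count x)).2.2,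
            some x, (((x :: t0).count x : Nat) : Int)) := by
        conv_lhs => rw [h1]
        rw [List.foldl_append, pvGroup x _ hk b bs t pr r hprx]
      have hrfpw : rf.Pairwise (· ≤ ·) := hpw.filter _
      have hrfmem : ∀ y ∈ rf, y ∈ x :: t0 := fun y hy => List.mem_of_mem_filter hy
      have hrfne : ∀ y ∈ rf, y ≠ x := fun y hy => by simpa using List.of_mem_filter hy
      have hbs' : ∀ y ∈ rf, (pvUpd (b, bs, t) x ((x :: t0).count x)).2.1 ≠ some y := by
        intro y hy
        unfold pvUpd
        split_ifs
        · exact fun h => (hrfne y hy) (by injection h with h'; exact h'.symm)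
        · exact hbs y (hrfmem y hy)
        · exact hbs y (hrfmem y hy)
      have hpr' : ∀ y ∈ rf, (some x : Option String) ≠ some y :=
        fun y hy h => (hrfne y hy) (by injection h with h'; exact h'.symm)
      obtain ⟨pr'', r'', heq⟩ := ih rf hlenrf hrfpw
        (pvUpd (b, bs, t) x ((x :: t0).count x)).1
        (pvUpd (b, bs, t) x ((x :: t0).count x)).2.1
        (pvUpd (b, bs, t) x ((x :: t0).count x)).2.2
        (some x) (((x :: t0).count x : Nat) : Int) hpr' hbs'
      refine ⟨pr'', r'', ?_⟩
      rw [hsplit, heq]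
      have hof : PySem.Set.ofList (x :: t0) = x :: PySem.Set.ofList rf := by
        conv_lhs => rw [h1]
        exact pvOfListDecomp x _ hk rf hxrf
      have hcnt : ∀ (acc : Int × Option String × Bool), ∀ y ∈ PySem.Set.ofList rf,
          pvUpd acc y (rf.count y) = pvUpd acc y ((x :: t0).count y) := by
        intro acc y hy
        have hyrf : y ∈ rf := (PySem.Set.mem_ofList rf y).mp hy
        have : rf.count y = (x :: t0).count y := by
          rw [hrf, List.count_filter]
          simp [hrfne y hyrf]
        rw [this]
      rw [hof, List.foldl_cons]
      rw [PySem.List.foldl_congr_mem _ _ _ _ hcnt]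

-- running max over the keys
def pvMax (keys : List String) (cnt : String → Int) (b : Int) : Int :=
  keys.foldl (fun m x => max m (cnt x)) b

theorem pvMax_le : ∀ (keys : List String) (cnt : String → Int) (b : Int),
    b ≤ pvMax keys cnt b ∧ ∀ x ∈ keys, cnt x ≤ pvMax keys cnt b := by
  intro keys
  induction keys with
  | nil => intro cnt b; exact ⟨le_refl b, by simp⟩
  | cons z ks ih =>
    intro cnt b
    have h := ih cnt (max b (cnt z))
    refine ⟨le_trans (le_max_left _ _) h.1, ?_⟩
    intro x hx
    rcases List.mem_cons.mp hx with h' | h'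
    · subst h'; exact le_trans (le_max_right _ _) h.1
    · exact h.2 x h'

theorem pvMax_attained : ∀ (keys : List String) (cnt : String → Int) (b : Int),
    pvMax keys cnt b = b ∨ ∃ x ∈ keys, cnt x = pvMax keys cnt b := by
  intro keys
  induction keys with
  | nil => intro cnt b; exact Or.inl rfl
  | cons z ks ih =>
    intro cnt b
    have hM : pvMax (z :: ks) cnt b = pvMax ks cnt (max b (cnt z)) := rfl
    rcases ih cnt (max b (cnt z)) with h | ⟨x, hx, hcx⟩
    · rcases max_choice b (cnt z) with hm | hm
      · exact Or.inl (by rw [hM, h, hm])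
      · exact Or.inr ⟨z, List.mem_cons_self, by rw [hM, h, hm]⟩
    · exact Or.inr ⟨x, List.mem_cons_of_mem _ hx, hcx⟩

-- stage 2: closed form of the pvUpd-fold over nodup keys
theorem pvStage2 : ∀ (keys : List String) (cnt : String → Int) (b : Int) (bs : Option String) (t : Bool),
    keys.Nodup → (∀ x ∈ keys, bs ≠ some x) →
    keys.foldl (fun s x => pvUpd s x (cnt x)) (b, bs, t) =
      (if b < pvMax keys cnt b then
        (pvMax keys cnt b, (keys.filter (fun x => cnt x = pvMax keys cnt b)).head?,
          decide (2 ≤ (keys.filter (fun x => cnt x = pvMax keys cnt b)).length))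
       else (b, bs, t || !(keys.filter (fun x => cnt x = pvMax keys cnt b)).isEmpty)) := by
  intro keys
  induction keys with
  | nil =>
    intro cnt b bs t _ _
    simp [pvMax]
  | cons z ks ih =>
    intro cnt b bs t hnd hbs
    have hnd' : ks.Nodup := (List.nodup_cons.mp hnd).2
    have hzks : z ∉ ks := (List.nodup_cons.mp hnd).1
    have hbs' : ∀ x ∈ ks, bs ≠ some x := fun x hx => hbs x (List.mem_cons_of_mem _ hx)
    have hbsz : bs ≠ some z := hbs z List.mem_cons_self
    have hM : pvMax (z :: ks) cnt b = pvMax ks cnt (max b (cnt z)) := rfl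
    rw [List.foldl_cons]
    rcases lt_trichotomy b (cnt z) with hlt | heq | hgt
    · -- the new run is a strict improvement
      have hupd : pvUpd (b, bs, t) z (cnt z) = (cnt z, some z, false) := by
        unfold pvUpd; rw [if_pos hlt]
      rw [hupd, ih cnt (cnt z) (some z) false hnd'
        (fun x hx h => hzks (by injection h with h'; exact h' ▸ hx))]
      have hMe : pvMax (z :: ks) cnt b = pvMax ks cnt (cnt z) := by
        rw [hM, max_eq_right hlt.le]
      have hble : b < pvMax (z :: ks) cnt b := lt_of_lt_of_le hlt (hMe ▸ (pvMax_le ks cnt (cnt z)).1)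
      rw [if_pos hble]
      by_cases hc : cnt z < pvMax ks cnt (cnt z)
      · rw [if_pos hc, List.filter_cons_of_neg (by simp [hMe]; omega)]
        rw [hMe]
      · have hMz : pvMax ks cnt (cnt z) = cnt z :=
          le_antisymm (not_lt.mp hc) (pvMax_le ks cnt (cnt z)).1
        rw [if_neg hc, List.filter_cons_of_pos (by simp [hMe, hMz])]
        rw [hMe, hMz]
        rcases ks.filter (fun x => decide (cnt x = cnt z)) with _ | ⟨a, lf⟩ <;> simp
    · -- the new run exactly ties the current best
      have hupd : pvUpd (b, bs, t) z (cnt z) = (b, bs, true) := by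
        unfold pvUpd
        rw [if_neg (by omega), if_pos ⟨heq.symm ▸ rfl, hbsz⟩]
      rw [hupd, ih cnt b bs true hnd' hbs']
      have hMe : pvMax (z :: ks) cnt b = pvMax ks cnt b := by
        rw [hM, heq, max_self]
      by_cases hc : b < pvMax ks cnt b
      · rw [if_pos hc, if_pos (hMe ▸ hc), List.filter_cons_of_neg (by simp [hMe]; omega), hMe]
      · have hMb : pvMax ks cnt b = b := le_antisymm (not_lt.mp hc) (pvMax_le ks cnt b).1
        rw [if_neg hc, if_neg (by rw [hMe]; exact hc),
          List.filter_cons_of_pos (by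
            simp only [decide_eq_true_eq]
            rw [hMe, hMb]
            exact heq.symm)]
        simp
    · -- the new run is shorter than the current best
      have hupd : pvUpd (b, bs, t) z (cnt z) = (b, bs, t) := by
        unfold pvUpd
        rw [if_neg (by omega), if_neg (by rintro ⟨h, -⟩; omega)]
      rw [hupd, ih cnt b bs t hnd' hbs']
      have hMe : pvMax (z :: ks) cnt b = pvMax ks cnt b := by
        rw [hM, max_eq_left hgt.le]
      have hzlt : cnt z < pvMax ks cnt b := lt_of_lt_of_le hgt (pvMax_le ks cnt b).1
      rw [List.filter_cons_of_neg (by simp [hMe]; omega), hMe]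

-- the two tally strategies agree on any nonempty list of answers
theorem pvMain (f : List String) (hf : f ≠ []) :
    (if (((PySem.Dict.counter f).items.filter
            (fun p => p.2 == (PySem.List.max? (PySem.Dict.counter f).values (fun v => v)).getD 0)).map
          (fun p => p.1)).length = 1
     then (((PySem.Dict.counter f).items.filter
            (fun p => p.2 == (PySem.List.max? (PySem.Dict.counter f).values (fun v => v)).getD 0)).map
          (fun p => p.1)).head?
     else none) =
    (if ((PySem.List.sorted f (fun s => s)).foldl pvStep (0, none, false, none, 0)).2.2.1 then none
     else ((PySem.List.sorted f (fun s => s)).foldl pvStep (0, none, false, none, 0)).2.1) := by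
  have hperm : (PySem.List.sorted f (fun s => s)).Perm f := PySem.List.sorted_perm f _ false
  have hpw : (PySem.List.sorted f (fun s => s)).Pairwise (· ≤ ·) :=
    PySem.List.sorted_pairwise f (fun s => s)
  obtain ⟨pr', r', hfold⟩ := pvStage1 _ (PySem.List.sorted f (fun s => s)) (le_refl _) hpw
    0 none false none 0 (fun x _ => by simp) (fun x _ => by simp)
  rw [hfold]
  have hQ := pvStage2 (PySem.Set.ofList (PySem.List.sorted f (fun s => s)))
    (fun y => ((PySem.List.sorted f (fun s => s)).count y : Int)) 0 none false
    (PySem.Set.nodup_ofList _) (fun x _ => by simp)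
  simp only [hperm.count_eq] at hQ ⊢
  rw [hQ]
  obtain ⟨a, t0, ha⟩ := List.exists_cons_of_ne_nil hf
  have haf : a ∈ f := ha ▸ List.mem_cons_self
  have haB : a ∈ PySem.Set.ofList (PySem.List.sorted f (fun s => s)) := by
    rw [PySem.Set.mem_ofList, PySem.List.mem_sorted]
    exact haf
  have h0 : 0 < pvMax (PySem.Set.ofList (PySem.List.sorted f (fun s => s)))
      (fun y => ((f.count y : Nat) : Int)) 0 := by
    have h1 := (pvMax_le (PySem.Set.ofList (PySem.List.sorted f (fun s => s)))
      (fun y => ((f.count y : Nat) : Int)) 0).2 a haB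
    have h2 : 0 < f.count a := List.count_pos_iff.mpr haf
    simp only at h1
    omega
  rw [if_pos h0]
  dsimp only
  -- A side: the Counter turns into the distinct values of f with their counts
  have hval : (PySem.Dict.counter f).values
      = (PySem.Set.ofList f).map (fun k => ((f.count k : Nat) : Int)) := by
    show ((PySem.Dict.counter f).items).map (fun x => x.2) = _
    rw [PySem.Dict.items_counter, List.map_map]
    rfl
  have hkAne : PySem.Set.ofList f ≠ [] :=
    List.ne_nil_of_mem ((PySem.Set.mem_ofList f a).mpr haf)
  obtain ⟨k0, kr, hk0⟩ := List.exists_cons_of_ne_nil hkAne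
  have hk0f : k0 ∈ f := (PySem.Set.mem_ofList f k0).mp (hk0 ▸ List.mem_cons_self)
  have htop : (PySem.List.max? (PySem.Dict.counter f).values (fun v => v)).getD 0
      = pvMax (PySem.Set.ofList f) (fun y => ((f.count y : Nat) : Int)) 0 := by
    rw [hval, hk0, List.map_cons, PySem.List.max?_id_cons, Option.getD_some, List.foldl_map]
    have hstep : pvMax (k0 :: kr) (fun y => ((f.count y : Nat) : Int)) 0
        = pvMax kr (fun y => ((f.count y : Nat) : Int)) (max 0 ((f.count k0 : Nat) : Int)) := rfl
    rw [hstep, max_eq_right (Int.natCast_nonneg _)]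
    rfl
  rw [htop]
  have hwin : ((PySem.Dict.counter f).items.filter
        (fun p => p.2 == pvMax (PySem.Set.ofList f) (fun y => ((f.count y : Nat) : Int)) 0)).map
        (fun p => p.1)
      = (PySem.Set.ofList f).filter
        (fun x => decide (((f.count x : Nat) : Int)
          = pvMax (PySem.Set.ofList f) (fun y => ((f.count y : Nat) : Int)) 0)) := by
    rw [PySem.Dict.items_counter, List.filter_map, List.map_map]
    have h1 : ((fun (p : String × Int) =>
          p.2 == pvMax (PySem.Set.ofList f) (fun y => ((f.count y : Nat) : Int)) 0)
          ∘ (fun k => (k, ((f.count k : Nat) : Int))))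
        = fun x => decide (((f.count x : Nat) : Int)
          = pvMax (PySem.Set.ofList f) (fun y => ((f.count y : Nat) : Int)) 0) := by
      funext k
      simp only [Function.comp]
      by_cases h : ((f.count k : Nat) : Int)
          = pvMax (PySem.Set.ofList f) (fun y => ((f.count y : Nat) : Int)) 0 <;> simp [h]
    rw [h1]
    have h2 : ((fun (p : String × Int) => p.1) ∘ (fun k => (k, ((f.count k : Nat) : Int))))
        = fun (x : String) => x := rfl
    rw [h2, List.map_id']
  rw [hwin]
  -- the two key lists are permutations of each other
  have hkperm : (PySem.Set.ofList (PySem.List.sorted f (fun s => s))).Perm (PySem.Set.ofList f) := by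
    rw [List.perm_ext_iff_of_nodup (PySem.Set.nodup_ofList _) (PySem.Set.nodup_ofList _)]
    intro y
    rw [PySem.Set.mem_ofList, PySem.Set.mem_ofList, PySem.List.mem_sorted]
  have hMeq : pvMax (PySem.Set.ofList (PySem.List.sorted f (fun s => s)))
        (fun y => ((f.count y : Nat) : Int)) 0
      = pvMax (PySem.Set.ofList f) (fun y => ((f.count y : Nat) : Int)) 0 :=
    hkperm.foldl_eq' (fun x _ y _ z => by dsimp only; rw [max_right_comm]) 0
  rw [hMeq]
  have hwperm : ((PySem.Set.ofList (PySem.List.sorted f (fun s => s))).filter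
        (fun x => decide (((f.count x : Nat) : Int)
          = pvMax (PySem.Set.ofList f) (fun y => ((f.count y : Nat) : Int)) 0))).Perm
      ((PySem.Set.ofList f).filter
        (fun x => decide (((f.count x : Nat) : Int)
          = pvMax (PySem.Set.ofList f) (fun y => ((f.count y : Nat) : Int)) 0))) :=
    hkperm.filter _
  by_cases hw1 : ((PySem.Set.ofList f).filter
      (fun x => decide (((f.count x : Nat) : Int)
        = pvMax (PySem.Set.ofList f) (fun y => ((f.count y : Nat) : Int)) 0))).length = 1
  · obtain ⟨w, hw⟩ := List.length_eq_one_iff.mp hw1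
    rw [if_pos hw1, hw]
    have hwB := List.perm_singleton.mp (hw ▸ hwperm)
    rw [hwB]
    norm_num
  · rw [if_neg hw1]
    rcases pvMax_attained (PySem.Set.ofList f) (fun y => ((f.count y : Nat) : Int)) 0
      with hA0 | ⟨x, hx, hcx⟩
    · exfalso
      rw [hMeq] at h0
      omega
    · have hxw : x ∈ (PySem.Set.ofList f).filter
          (fun x => decide (((f.count x : Nat) : Int)
            = pvMax (PySem.Set.ofList f) (fun y => ((f.count y : Nat) : Int)) 0)) :=
        List.mem_filter.mpr ⟨hx, by simpa using hcx⟩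
      have hge1 : 1 ≤ ((PySem.Set.ofList f).filter
          (fun x => decide (((f.count x : Nat) : Int)
            = pvMax (PySem.Set.ofList f) (fun y => ((f.count y : Nat) : Int)) 0))).length :=
        List.length_pos_iff.mpr (List.ne_nil_of_mem hxw)
      have h2 : 2 ≤ ((PySem.Set.ofList (PySem.List.sorted f (fun s => s))).filter
          (fun x => decide (((f.count x : Nat) : Int)
            = pvMax (PySem.Set.ofList f) (fun y => ((f.count y : Nat) : Int)) 0))).length := by
        rw [hwperm.length_eq]
        omega
      rw [if_pos (by simpa using h2)]

-- ===== VERDICT (by name: the statement is the Claim_ definition above) =====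
theorem plurality_answer_spec : Claim_equal_plurality_answer := by
  unfold Claim_equal_plurality_answer
  intro answers _
  unfold Spec_plurality_answer
  cases answers with
  | none => rfl
  | some xs =>
    show plurality_answer (some xs) = plurality_answer_alt (some xs)
    unfold plurality_answer plurality_answer_alt
    dsimp only
    by_cases hxs : xs = []
    · rw [if_pos hxs, if_pos hxs]
    · rw [if_neg hxs, if_neg hxs]
      by_cases hfe : xs.filterMap (fun a => a.map (fun s => s)) = []
      · rw [if_pos hfe, if_pos hfe]
      · rw [if_neg hfe, if_neg hfe]
        exact pvMain _ hfe
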